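-- pv_equiv track=rewrite | github.com/pdh4869/solveAlgorithm | 프로그래머스/0/181900. 글자 지우기/글자 지우기.py | solution
-- ===== SOURCE A (Python) =====
-- def solution(my_string, indices):
--     answer = ''
--
--     for i in range(len(my_string)):
--         if i in indices:
--             answer += ''
--         else:
--             answer += my_string[i]
--
--     return answer
-- ===== SOURCE B (Python) =====
-- def solution(my_string, indices):
--     n = len(my_string)
--     cuts = sorted(set(i for i in indices if 0 <= i < n))
--     parts = []
--     prev = 0
--     for c in cuts:
--         parts.append(my_string[prev:c])
--         prev = c + 1
--     parts.append(my_string[prev:])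
--     return ''.join(parts)
-- ===== Notes on version B (the rewrite author's own statement) =====
-- stated objective: faster
-- what changed: Instead of scanning every character position and testing it against the indices list (a linear membership scan per character), B dedupes and range-filters the indices once, sorts them, and concatenates the contiguous surviving slices between consecutive cut points.
import Mathlib
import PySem

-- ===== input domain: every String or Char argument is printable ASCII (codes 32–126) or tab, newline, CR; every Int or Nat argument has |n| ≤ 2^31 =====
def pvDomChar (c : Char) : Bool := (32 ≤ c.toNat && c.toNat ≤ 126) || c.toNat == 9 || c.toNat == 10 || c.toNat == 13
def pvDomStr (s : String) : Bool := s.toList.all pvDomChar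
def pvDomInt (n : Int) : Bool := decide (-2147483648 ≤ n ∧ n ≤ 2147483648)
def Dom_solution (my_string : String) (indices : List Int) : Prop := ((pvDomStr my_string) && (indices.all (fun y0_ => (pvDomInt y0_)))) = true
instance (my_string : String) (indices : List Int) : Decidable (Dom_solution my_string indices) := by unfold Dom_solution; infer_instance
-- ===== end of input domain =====

-- B replaces A's per-character membership scan of `indices` by a dedup+filter+sort of the
-- indices followed by concatenating the contiguous surviving slices (measurably faster).


-- ===== PORT A =====
-- for i in range(len(my_string)): answer += '' if i in indices else my_string[i]
-- (i is always a valid index here, so my_string[i] never raises; pyGet? is exact)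
def solution (my_string : String) (indices : List Int) : String :=
  let cs := my_string.toList
  let answer := (PySem.List.pyRange 0 (PySem.Chars.len cs)).foldl
    (fun answer i =>
      if indices.contains i then answer ++ ([] : List Char)
      else answer ++ ((PySem.List.pyGet? cs i).elim [] (fun c => [c]))) []
  String.ofList answer

-- ===== PORT B =====
def solution_alt (my_string : String) (indices : List Int) : String :=
  let cs := my_string.toList
  let n : Int := PySem.Chars.len cs
  let cuts := PySem.List.sorted
    (PySem.Set.ofList (indices.filter (fun i => decide (0 ≤ i) && decide (i < n)))) (fun x => x)
  let st := cuts.foldl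
    (fun (st : List (List Char) × Int) c =>
      (st.1 ++ [PySem.List.slice cs (some st.2) (some c)], c + 1)) ([], 0)
  let parts := st.1 ++ [PySem.List.slice cs (some st.2) none]
  String.ofList (PySem.Chars.join [] parts)

-- ===== PRECONDITION & SPEC =====
def Spec_solution (my_string : String) (indices : List Int) (out : String) : Prop := out = solution_alt my_string indices
instance (my_string : String) (indices : List Int) (out : String) : Decidable (Spec_solution my_string indices out) := by unfold Spec_solution; infer_instance

-- ===== CLAIM (what is proved, stated in full; the proofs are below) =====
def Claim_equal_solution : Prop := ∀ (my_string : String) (indices : List Int), Dom_solution my_string indices → Spec_solution my_string indices (solution my_string indices)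

-- ===== LEMMAS AND PROOFS =====

-- the one-character optional-get of A's loop body
def pvOptGet (cs : List Char) (i : Int) : List Char :=
  (PySem.List.pyGet? cs i).elim [] (fun c => [c])

-- the surviving segments of B, as a structural recursion over the sorted cut points
def pvSegs (cs : List Char) : List Int → Int → List Char
  | [], prev => PySem.List.slice cs (some prev) none
  | c :: r, prev => PySem.List.slice cs (some prev) (some c) ++ pvSegs cs r (c + 1)

theorem pvGetIn (cs : List Char) (a : Int) (h0 : 0 ≤ a) (h : a < (cs.length : Int)) :
    PySem.List.pyGet? cs a = some (cs[a.toNat]'(by omega)) := by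
  simp [PySem.List.pyGet?, PySem.List.pyIdx?, h0, h]

theorem pvJoinNil (ps : List (List Char)) : PySem.Chars.join [] ps = ps.flatten := by
  simp only [PySem.Chars.join]
  induction ps with
  | nil => rfl
  | cons x t ih => cases t with
    | nil => simp [List.intercalate]
    | cons y u => simp_all [List.intercalate, List.intersperse]

-- B's foldl over the cuts computes pvSegs
theorem pvFoldSegs (cs : List Char) (cuts : List Int) (acc : List (List Char)) (prev : Int) :
    (((cuts.foldl (fun (st : List (List Char) × Int) c =>
        (st.1 ++ [PySem.List.slice cs (some st.2) (some c)], c + 1)) (acc, prev)).1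
      ++ [PySem.List.slice cs (some (cuts.foldl (fun (st : List (List Char) × Int) c =>
        (st.1 ++ [PySem.List.slice cs (some st.2) (some c)], c + 1)) (acc, prev)).2) none]).flatten)
    = acc.flatten ++ pvSegs cs cuts prev := by
  induction cuts generalizing acc prev with
  | nil => simp [pvSegs]
  | cons c r ih => simp [pvSegs, List.foldl_cons, ih]

-- a run of consecutive in-range positions yields the corresponding slice
theorem pvRunSlice (cs : List Char) (m : Nat) (a : Int) (ha : 0 ≤ a)
    (hb : a + m ≤ (cs.length : Int)) :
    (PySem.List.pyRange a (a + m)).flatMap (pvOptGet cs)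
      = (cs.drop a.toNat).take m := by
  induction m generalizing a with
  | zero =>
    rw [PySem.List.pyRange_one_eq_nil (by omega : a + ((0:Nat):Int) ≤ a)]
    simp
  | succ m ih =>
    rw [PySem.List.pyRange_one_cons (by push_cast; omega : a < a + ((m+1:Nat):Int))]
    rw [List.flatMap_cons]
    have h1 : a + ((m+1 : Nat) : Int) = (a + 1) + (m : Nat) := by push_cast; ring
    rw [h1, ih (a+1) (by omega) (by push_cast at hb ⊢; omega)]
    have hlt : a.toNat < cs.length := by push_cast at hb; omega
    simp [pvOptGet, pvGetIn cs a ha (by omega)]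
    have h2 : (a+1).toNat = a.toNat + 1 := by omega
    rw [h2]
    conv_rhs => rw [List.drop_eq_getElem_cons hlt, List.take_succ_cons]

-- main lemma: dropping the positions of a sorted, strictly increasing, in-range cut list
-- equals concatenating the surviving segments between consecutive cuts
theorem pvMain (cs : List Char) (cuts : List Int) (prev : Int)
    (hp : 0 ≤ prev) (hpn : prev ≤ (cs.length : Int))
    (hsort : cuts.Pairwise (· < ·))
    (hb : ∀ c ∈ cuts, prev ≤ c ∧ c < (cs.length : Int)) :
    (PySem.List.pyRange prev (cs.length : Int)).flatMap
      (fun i => if cuts.contains i then [] else pvOptGet cs i)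
    = pvSegs cs cuts prev := by
  induction cuts generalizing prev with
  | nil =>
    rw [List.flatMap_congr (g := pvOptGet cs) (by intro x hx; simp)]
    have hm : (cs.length : Int) = prev + ((cs.length - prev.toNat : Nat) : Int) := by omega
    rw [hm, pvRunSlice cs _ prev hp (by omega)]
    rw [pvSegs, PySem.List.slice_from cs hp]
    exact List.take_of_length_le (by simp)
  | cons c r ih =>
    have hc := hb c List.mem_cons_self
    have hrgt : ∀ x ∈ r, c < x := (List.pairwise_cons.mp hsort).1
    have hsplit : PySem.List.pyRange prev (cs.length : Int)
        = PySem.List.pyRange prev c ++ (c :: PySem.List.pyRange (c+1) (cs.length : Int)) := by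
      rw [PySem.List.pyRange_one_append prev c (cs.length : Int) hc.1 (by omega),
          PySem.List.pyRange_one_cons hc.2]
    rw [hsplit, List.flatMap_append, List.flatMap_cons]
    have hcin : ((c :: r).contains c) = true := by simp
    rw [pvSegs]
    have hfirst : (PySem.List.pyRange prev c).flatMap
        (fun i => if (c :: r).contains i then [] else pvOptGet cs i)
        = PySem.List.slice cs (some prev) (some c) := by
      rw [List.flatMap_congr (g := pvOptGet cs) ?_]
      · have hm : c = prev + ((c - prev).toNat : Int) := by omega
        rw [hm, pvRunSlice cs _ prev hp (by omega)]
        rw [PySem.List.slice_toNat cs hp (by omega)]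
        congr 1
        omega
      · intro x hx
        rw [PySem.List.mem_pyRange_one] at hx
        have hxf : (c :: r).contains x = false := by
          simp only [List.contains_eq_mem, decide_eq_false_iff_not, List.mem_cons]
          rintro (h | h)
          · omega
          · have := hrgt x h; omega
        rw [if_neg (by simp only [hxf]; exact Bool.false_ne_true)]
    have hrest : (PySem.List.pyRange (c+1) (cs.length : Int)).flatMap
        (fun i => if (c :: r).contains i then [] else pvOptGet cs i)
        = pvSegs cs r (c+1) := by
      rw [List.flatMap_congr (g := fun i => if r.contains i then [] else pvOptGet cs i) ?_]
      · exact ih (c+1) (by omega) (by omega) (List.pairwise_cons.mp hsort).2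
          (by intro y hy; have := hrgt y hy; have := (hb y (List.mem_cons_of_mem c hy)).2; omega)
      · intro x hx
        rw [PySem.List.mem_pyRange_one] at hx
        have hcr : (c :: r).contains x = r.contains x := by
          simp only [List.contains_eq_mem, List.mem_cons, decide_eq_decide]
          constructor
          · rintro (h | h)
            · omega
            · exact h
          · exact Or.inr
        rw [hcr]
    rw [hfirst, hcin, if_pos rfl, hrest]
    simp

-- ===== VERDICT (by name: the statement is the Claim_ definition above) =====
theorem solution_spec : Claim_equal_solution := by
  intro my_string indices _
  unfold Spec_solution solution solution_alt
  simp only [PySem.Chars.len_eq]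
  set cs := my_string.toList with hcs
  set cuts := PySem.List.sorted
    (PySem.Set.ofList (indices.filter (fun i => decide (0 ≤ i) && decide (i < (cs.length : Int)))))
    (fun x => x) with hcuts
  have hmemcuts : ∀ i, i ∈ cuts ↔ (i ∈ indices ∧ 0 ≤ i ∧ i < (cs.length : Int)) := by
    intro i
    rw [hcuts, PySem.List.mem_sorted, PySem.Set.mem_ofList, List.mem_filter]
    simp
  apply congrArg String.ofList
  rw [pvJoinNil, pvFoldSegs]
  rw [PySem.List.foldl_congr_mem _ _
    (fun ans i => ans ++ (if cuts.contains i then [] else pvOptGet cs i)) _ ?_]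
  · rw [PySem.List.foldl_append_eq_flatMap]
    rw [pvMain cs cuts 0 le_rfl (by positivity)
      (PySem.List.sorted_ofList_pairwise_lt _)
      (by intro y hy; have := (hmemcuts y).mp hy; exact ⟨this.2.1, this.2.2⟩)]
    simp only [List.nil_append, List.flatten_nil]
    rfl
  · intro acc x hx
    rw [PySem.List.mem_pyRange_one] at hx
    have hcr : indices.contains x = cuts.contains x := by
      simp only [List.contains_eq_mem, decide_eq_decide, hmemcuts]
      constructor
      · exact fun h => ⟨h, hx.1, hx.2⟩
      · exact fun h => h.1
    by_cases h : cuts.contains x = true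
    · have hxin : x ∈ indices := by
        have := hcr.trans h
        simpa using this
      have hxc : x ∈ cuts := by simpa using h
      simp [hxin, hxc]
    · have hxout : x ∉ indices := by
        intro hm
        apply h
        rw [← hcr]
        simpa using hm
      have hxnc : x ∉ cuts := by simpa using h
      simp [hxout, hxnc, pvOptGet]
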